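-- pv_equiv track=rewrite | github.com/peter-233/cs5246-project | supporter/embedder/bert_embedder.py | __extract_sentence_by_word_position
-- ===== SOURCE A (Python) =====
-- def __extract_sentence_by_word_position(article: str, start_pos: int, end_pos: int) -> tuple[int, int]:
--     if start_pos < 0 or end_pos > len(article) or start_pos >= end_pos:
--         raise ValueError("Invalid word positions")
--
--     sentence_endings = ['.', '!', '?']
--
--     sentence_start = start_pos
--     while sentence_start > 0:
--         if article[sentence_start - 1] in sentence_endings and (
--                 sentence_start == len(article) or
--                 article[sentence_start] == ' ' or
--                 article[sentence_start] == '\n'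
--         ):
--             break
--         sentence_start -= 1
--
--     sentence_end = end_pos
--     while sentence_end < len(article):
--         if article[sentence_end] in sentence_endings:
--             sentence_end += 1
--             break
--         sentence_end += 1
--
--     return sentence_start, sentence_end
-- ===== SOURCE B (Python) =====
-- def __extract_sentence_by_word_position(article: str, start_pos: int, end_pos: int) -> tuple[int, int]:
--     if start_pos < 0 or end_pos > len(article) or start_pos >= end_pos:
--         raise ValueError("Invalid word positions")
--
--     sentence_start = 0
--     for i in range(start_pos):
--         if article[i] in '.!?' and article[i + 1] in ' \n':
--             sentence_start = i + 1
--
--     hits = [j for j in (article.find(c, end_pos) for c in '.!?') if j != -1]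
--     sentence_end = min(hits) + 1 if hits else len(article)
--
--     return sentence_start, sentence_end
-- ===== Notes on version B (the rewrite author's own statement) =====
-- stated objective: alternative
-- what changed: The backward scan-with-break for the start boundary becomes a forward accumulating scan keeping the last sentence boundary before start_pos, and the hand-written forward break loop for the end boundary becomes a min over per-character str.find(c, end_pos) results; validation and return shape are unchanged.
import Mathlib
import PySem

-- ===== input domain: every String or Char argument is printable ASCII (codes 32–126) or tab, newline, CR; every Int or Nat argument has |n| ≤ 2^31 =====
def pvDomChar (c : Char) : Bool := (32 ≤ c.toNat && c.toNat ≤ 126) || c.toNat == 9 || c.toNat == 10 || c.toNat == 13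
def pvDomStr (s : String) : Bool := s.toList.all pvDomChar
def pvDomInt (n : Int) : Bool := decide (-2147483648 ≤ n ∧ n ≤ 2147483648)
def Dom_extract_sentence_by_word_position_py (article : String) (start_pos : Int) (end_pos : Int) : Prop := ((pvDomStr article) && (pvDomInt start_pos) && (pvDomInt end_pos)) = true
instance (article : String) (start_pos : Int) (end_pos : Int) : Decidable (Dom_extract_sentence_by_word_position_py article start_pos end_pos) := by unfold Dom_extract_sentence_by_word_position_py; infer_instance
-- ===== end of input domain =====

set_option maxRecDepth 8192


-- B replaces A's two hand-written scan-with-break loops by a forward accumulating scan for the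
-- start boundary and a min-over-per-character str.find selection for the end boundary (objective:
-- idiomatic/alternative; same asymptotic cost).

-- ===== PORT A =====

-- membership test `article[i] in <list of chars>`; the Python indexing is always in range
-- where these loops run under Pre_, so the `none` case is never reached there.
def pvMemA (o : Option Char) (cs : List Char) : Bool :=
  match o with
  | some c => cs.contains c
  | none => false

-- `while sentence_start > 0: if … break; sentence_start -= 1`
def aStartLoop (l : List Char) : Nat → Nat
  | 0 => 0
  | s + 1 =>
    if pvMemA l[s]? ['.', '!', '?'] &&
        (decide (s + 1 = l.length) || decide (l[s+1]? = some ' ') || decide (l[s+1]? = some '\n'))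
    then s + 1
    else aStartLoop l s

-- `while sentence_end < len(article): if … : sentence_end += 1; break; sentence_end += 1`
def aEndLoop (l : List Char) (e : Nat) : Nat :=
  if e < l.length then
    (if pvMemA l[e]? ['.', '!', '?'] then e + 1 else aEndLoop l (e + 1))
  else e
termination_by l.length - e

def extract_sentence_by_word_position_py (article : String) (start_pos : Int) (end_pos : Int) : Int × Int :=
  let l := article.toList
  if start_pos < 0 ∨ (l.length : Int) < end_pos ∨ end_pos ≤ start_pos then
    (0, 0)  -- Python raises ValueError here; excluded by Pre_
  else
    ((aStartLoop l start_pos.toNat : Int), (aEndLoop l end_pos.toNat : Int))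

-- ===== PORT B =====

-- `for i in range(start_pos): if article[i] in '.!?' and article[i+1] in ' \n': sentence_start = i+1`
def bStart (l : List Char) (n : Nat) : Nat :=
  (List.range n).foldl
    (fun acc i => if pvMemA l[i]? ['.', '!', '?'] && pvMemA l[i+1]? [' ', '\n'] then i + 1 else acc) 0

-- `hits = [j for j in (article.find(c, end_pos) for c in '.!?') if j != -1]`
-- `sentence_end = min(hits) + 1 if hits else len(article)`
def bEnd (article : String) (end_pos : Int) : Int :=
  let hits := ((['.', '!', '?'].map
      (fun c => PySem.Str.findFrom article (String.ofList [c]) end_pos none)).filter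
      (fun j => decide (j ≠ -1)))
  match PySem.List.min? hits (fun x => x) with
  | some m => m + 1
  | none => (article.toList.length : Int)

def extract_sentence_by_word_position_py_alt (article : String) (start_pos : Int) (end_pos : Int) : Int × Int :=
  if start_pos < 0 ∨ (article.toList.length : Int) < end_pos ∨ end_pos ≤ start_pos then
    (0, 0)  -- Python raises ValueError here; excluded by Pre_
  else
    ((bStart article.toList start_pos.toNat : Int), bEnd article end_pos)

-- ===== PRECONDITION & SPEC =====

-- exactly the inputs the Python validation accepts (otherwise both raise ValueError)
def Pre_extract_sentence_by_word_position_py (article : String) (start_pos : Int) (end_pos : Int) : Prop :=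
  0 ≤ start_pos ∧ end_pos ≤ (article.toList.length : Int) ∧ start_pos < end_pos

instance (article : String) (start_pos : Int) (end_pos : Int) : Decidable (Pre_extract_sentence_by_word_position_py article start_pos end_pos) := by unfold Pre_extract_sentence_by_word_position_py; infer_instance

def pvWitness_extract_sentence_by_word_position_py : String × Int × Int := ("Hi. Yes!", 4, 6)

def Spec_extract_sentence_by_word_position_py (article : String) (start_pos : Int) (end_pos : Int) (out : Int × Int) : Prop := out = extract_sentence_by_word_position_py_alt article start_pos end_pos
instance (article : String) (start_pos : Int) (end_pos : Int) (out : Int × Int) : Decidable (Spec_extract_sentence_by_word_position_py article start_pos end_pos out) := by unfold Spec_extract_sentence_by_word_position_py; infer_instance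

-- ===== CLAIM (what is proved, stated in full; the proofs are below) =====
def Claim_equal_extract_sentence_by_word_position_py : Prop := ∀ (article : String) (start_pos : Int) (end_pos : Int), Dom_extract_sentence_by_word_position_py article start_pos end_pos → Pre_extract_sentence_by_word_position_py article start_pos end_pos → Spec_extract_sentence_by_word_position_py article start_pos end_pos (extract_sentence_by_word_position_py article start_pos end_pos)

-- ===== LEMMAS AND PROOFS =====

-- ---- start boundary: backward break-loop = forward accumulating fold ----

theorem startLoop_eq_bStart (l : List Char) (k : Nat) (hk : k < l.length) :
    aStartLoop l k = bStart l k := by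
  induction k with
  | zero => simp [aStartLoop, bStart]
  | succ s ih =>
    have hs : s < l.length := Nat.lt_of_succ_lt hk
    have hs1 : s + 1 < l.length := hk
    rw [aStartLoop, bStart, List.range_succ, List.foldl_append]
    rw [← bStart, ← ih hs]
    have h1 : l[s+1]? = some l[s+1] := List.getElem?_eq_getElem hs1
    have hne : decide (s + 1 = l.length) = false := by simp; omega
    simp only [List.foldl_cons, List.foldl_nil, hne, h1, pvMemA, pvMemA, Bool.false_or]
    have : (decide (some l[s+1] = some ' ') || decide (some l[s+1] = some '\n')) =
        ([' ', '\n'].contains l[s+1]) := by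
      rw [Bool.eq_iff_iff]; simp
    rw [this]

-- ---- end boundary: common characterisation via the first sentence-ending index ----

-- first index of a sentence-ending character (proof-side helper)
def firstHit : List Char → Option Nat
  | [] => none
  | x :: t => if x ∈ (['.', '!', '?'] : List Char) then some 0 else (firstHit t).map (· + 1)

-- first index of the character c (proof-side helper)
def firstIdx (c : Char) : List Char → Option Nat
  | [] => none
  | x :: t => if x = c then some 0 else (firstIdx c t).map (· + 1)

def endSpec (l : List Char) (e : Nat) : Int :=
  match firstHit (l.drop e) with
  | some i => (e : Int) + i + 1
  | none => (l.length : Int)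

theorem aEndLoop_eq_endSpec (l : List Char) (e : Nat) (he : e ≤ l.length) :
    ((aEndLoop l e : Nat) : Int) = endSpec l e := by
  induction hn : l.length - e generalizing e with
  | zero =>
    have : e = l.length := by omega
    subst this
    rw [aEndLoop]
    simp [endSpec, firstHit]
  | succ n ih =>
    have hlt : e < l.length := by omega
    rw [aEndLoop, if_pos hlt]
    have hget : l[e]? = some l[e] := List.getElem?_eq_getElem hlt
    have hdrop : l.drop e = l[e] :: l.drop (e + 1) := List.drop_eq_getElem_cons hlt
    by_cases hc : l[e] ∈ (['.', '!', '?'] : List Char)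
    · have : pvMemA l[e]? ['.', '!', '?'] = true := by
        simp [pvMemA, hget, hc]
      rw [if_pos this]
      simp only [endSpec, hdrop, firstHit, if_pos hc]
      push_cast
      omega
    · have : pvMemA l[e]? ['.', '!', '?'] = false := by
        simp only [pvMemA, hget]
        simpa [List.contains_iff_mem] using hc
      rw [if_neg (by simp [this])]
      rw [ih (e + 1) (by omega) (by omega)]
      simp only [endSpec, hdrop, firstHit, if_neg hc]
      cases h : firstHit (l.drop (e + 1)) with
      | none => simp
      | some i => simp; ring

theorem firstIdx_none_iff (c : Char) (m : List Char) : firstIdx c m = none ↔ c ∉ m := by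
  induction m with
  | nil => simp [firstIdx]
  | cons x t ih =>
    by_cases hx : x = c
    · subst hx; simp [firstIdx]
    · simp [firstIdx, hx, ih, Ne.symm hx]

theorem firstIdx_some (c : Char) (m : List Char) (i : Nat) (h : firstIdx c m = some i) :
    m[i]? = some c ∧ ∀ j < i, m[j]? ≠ some c := by
  induction m generalizing i with
  | nil => simp [firstIdx] at h
  | cons x t ih =>
    by_cases hx : x = c
    · subst hx
      simp [firstIdx] at h
      subst h
      simp
    · rw [firstIdx, if_neg hx] at h
      cases hi : firstIdx c t with
      | none => rw [hi] at h; simp at h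
      | some i' =>
        rw [hi] at h
        simp at h
        subst h
        obtain ⟨h1, h2⟩ := ih i' hi
        refine ⟨by simpa using h1, ?_⟩
        intro j hj
        cases j with
        | zero => simpa using hx
        | succ j' =>
          simpa using h2 j' (by omega)

theorem firstIdx_of (c : Char) (m : List Char) (i : Nat) (h1 : m[i]? = some c)
    (h2 : ∀ j < i, m[j]? ≠ some c) : firstIdx c m = some i := by
  induction m generalizing i with
  | nil => simp at h1
  | cons x t ih =>
    cases i with
    | zero =>
      simp at h1
      simp [firstIdx, h1]
    | succ i' =>
      have hx : x ≠ c := by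
        have := h2 0 (by omega)
        simpa using this
      rw [firstIdx, if_neg hx]
      have : firstIdx c t = some i' := by
        apply ih
        · simpa using h1
        · intro j hj
          have := h2 (j + 1) (by omega)
          simpa using this
      simp [this]

theorem singleton_prefix_iff (c : Char) (u : List Char) : [c] <+: u ↔ u.head? = some c := by
  constructor
  · rintro ⟨t, rfl⟩; rfl
  · intro h
    cases u with
    | nil => simp at h
    | cons x t =>
      simp at h
      exact ⟨t, by simp [h]⟩

theorem singleton_infix_iff (c : Char) (m : List Char) : [c] <:+: m ↔ c ∈ m := by
  constructor
  · intro h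
    exact h.subset (by simp)
  · intro h
    obtain ⟨s, t, rfl⟩ := List.append_of_mem h
    exact ⟨s, t, by simp⟩

theorem find_eq_firstIdx (c : Char) (m : List Char) :
    PySem.Chars.find m [c] =
      (match firstIdx c m with | some i => (i : Int) | none => -1) := by
  cases h : firstIdx c m with
  | none =>
    have : c ∉ m := (firstIdx_none_iff c m).mp h
    simp [(PySem.Chars.find_eq_neg_one_iff m [c]).mpr (by rw [singleton_infix_iff]; exact this)]
  | some i =>
    obtain ⟨h1, h2⟩ := firstIdx_some c m i h
    have hmem : c ∈ m := List.mem_of_getElem? h1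
    have hnn : 0 ≤ PySem.Chars.find m [c] := by
      rw [PySem.Chars.find_nonneg_iff, singleton_infix_iff]
      exact hmem
    obtain ⟨hp, hmin⟩ := PySem.Chars.find_spec hnn
    set k := (PySem.Chars.find m [c]).toNat with hk
    have hk1 : m[k]? = some c := by
      rw [← List.head?_drop]
      exact (singleton_prefix_iff c _).mp hp
    have hki : k = i := by
      rcases Nat.lt_trichotomy k i with h' | h' | h'
      · exact absurd hk1 (h2 k h')
      · exact h'
      · exact absurd ((singleton_prefix_iff c _).mpr (by rw [List.head?_drop]; exact h1))
          (hmin i h')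
    have : PySem.Chars.find m [c] = (k : Int) := (Int.toNat_of_nonneg hnn).symm
    rw [this, hki]

theorem firstHit_none (m : List Char) (h : firstHit m = none) :
    ∀ x ∈ m, x ∉ (['.', '!', '?'] : List Char) := by
  induction m with
  | nil => simp
  | cons x t ih =>
    by_cases hx : x ∈ (['.', '!', '?'] : List Char)
    · simp [firstHit, hx] at h
    · rw [firstHit, if_neg hx] at h
      simp at h
      intro y hy
      rcases List.mem_cons.mp hy with rfl | hy'
      · exact hx
      · exact ih h y hy'

theorem firstHit_some (m : List Char) (i : Nat) (h : firstHit m = some i) :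
    (∃ c, m[i]? = some c ∧ c ∈ (['.', '!', '?'] : List Char)) ∧
      ∀ j < i, ∀ x, m[j]? = some x → x ∉ (['.', '!', '?'] : List Char) := by
  induction m generalizing i with
  | nil => simp [firstHit] at h
  | cons x t ih =>
    by_cases hx : x ∈ (['.', '!', '?'] : List Char)
    · rw [firstHit, if_pos hx] at h
      simp at h
      subst h
      exact ⟨⟨x, by simp, hx⟩, by intro j hj; omega⟩
    · rw [firstHit, if_neg hx] at h
      cases hi : firstHit t with
      | none => rw [hi] at h; simp at h
      | some i' =>
        rw [hi] at h
        simp at h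
        subst h
        obtain ⟨⟨c, hc1, hc2⟩, hmin⟩ := ih i' hi
        refine ⟨⟨c, by simpa using hc1, hc2⟩, ?_⟩
        intro j hj y hy
        cases j with
        | zero => simp at hy; subst hy; exact hx
        | succ j' => exact hmin j' (by omega) y (by simpa using hy)

theorem bEnd_eq_endSpec (article : String) (e : Nat) (he : e ≤ article.toList.length) :
    bEnd article (e : Int) = endSpec article.toList e := by
  set l := article.toList with hl
  have hfc : ∀ c : Char,
      PySem.Str.findFrom article (String.ofList [c]) (e : Int) none =
        (match firstIdx c (l.drop e) with
          | some i => ((e + i : Nat) : Int)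
          | none => -1) := by
    intro c
    rw [PySem.Str.findFrom_eq, String.toList_ofList, ← hl,
      PySem.Chars.findFrom_natCast l [c] e he, find_eq_firstIdx]
    cases h : firstIdx c (l.drop e) with
    | none => simp
    | some i =>
      have hne : ¬ ((i : Nat) : Int) = -1 := by omega
      simp [hne]
  rw [bEnd]
  simp only [List.map_cons, List.map_nil, hfc]
  cases hfh : firstHit (l.drop e) with
  | none =>
    have hnone : ∀ c : Char, c ∈ (['.', '!', '?'] : List Char) → firstIdx c (l.drop e) = none := by
      intro c hc
      rw [firstIdx_none_iff]
      intro hmem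
      exact firstHit_none _ hfh c hmem hc
    rw [hnone '.' (by simp), hnone '!' (by simp), hnone '?' (by simp)]
    simp [endSpec, ← hl, hfh, PySem.List.min?]
  | some i =>
    obtain ⟨⟨c0, hc0, hc0E⟩, hmin⟩ := firstHit_some _ i hfh
    -- the three candidate values, after the match
    set g : Char → Int := fun c =>
      (match firstIdx c (l.drop e) with
        | some i => ((e + i : Nat) : Int)
        | none => -1) with hg
    -- every kept hit is ≥ e + i
    have hge : ∀ c : Char, c ∈ (['.', '!', '?'] : List Char) → g c ≠ -1 →
        ((e + i : Nat) : Int) ≤ g c := by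
      intro c hcE hne
      cases hfi : firstIdx c (l.drop e) with
      | none => rw [hg] at hne; simp [hfi] at hne
      | some k =>
        obtain ⟨hk1, _⟩ := firstIdx_some c _ k hfi
        have : i ≤ k := by
          by_contra hlt
          exact hmin k (by omega) c hk1 hcE
        simp only [hg, hfi]
        push_cast
        omega
    -- c0's hit is exactly e + i
    have hc0g : g c0 = ((e + i : Nat) : Int) := by
      have : firstIdx c0 (l.drop e) = some i := by
        apply firstIdx_of c0 _ i hc0
        intro j hj hje
        exact hmin j hj c0 hje hc0E
      simp [hg, this]
    have hc0ne : g c0 ≠ -1 := by rw [hc0g]; omega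
    -- the filtered hit list
    set hits := (([g '.', g '!', g '?']).filter (fun j => decide (j ≠ -1))) with hhits
    have hmemhits : ((e + i : Nat) : Int) ∈ hits := by
      rw [← hc0g, hhits, List.mem_filter]
      refine ⟨?_, by simpa using hc0ne⟩
      have hc0E' : c0 = '.' ∨ c0 = '!' ∨ c0 = '?' := by simpa using hc0E
      rcases hc0E' with rfl | rfl | rfl <;> simp
    have hboundhits : ∀ y ∈ hits, ((e + i : Nat) : Int) ≤ y := by
      intro y hy
      rw [hhits, List.mem_filter] at hy
      obtain ⟨hy1, hy2⟩ := hy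
      have hy2' : y ≠ -1 := by simpa using hy2
      simp only [List.mem_cons, List.not_mem_nil, or_false] at hy1
      rcases hy1 with rfl | rfl | rfl
      · exact hge '.' (by simp) hy2'
      · exact hge '!' (by simp) hy2'
      · exact hge '?' (by simp) hy2'
    cases hm : PySem.List.min? hits (fun x => x) with
    | none =>
      rw [PySem.List.min?_eq_none_iff] at hm
      rw [hm] at hmemhits
      simp at hmemhits
    | some m =>
      have h1 : ((e + i : Nat) : Int) ≤ m := hboundhits m (PySem.List.min?_mem hm)
      have h2 : m ≤ ((e + i : Nat) : Int) := PySem.List.min?_isMin hm _ hmemhits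
      have : m = ((e + i : Nat) : Int) := le_antisymm h2 h1
      subst this
      simp only [endSpec, hfh]
      push_cast
      ring

-- ===== VERDICT (by name: the statement is the Claim_ definition above) =====
theorem extract_sentence_by_word_position_py_spec : Claim_equal_extract_sentence_by_word_position_py := by
  intro article start_pos end_pos _hdom hpre
  obtain ⟨h0, h1, h2⟩ := hpre
  unfold Spec_extract_sentence_by_word_position_py
  unfold extract_sentence_by_word_position_py extract_sentence_by_word_position_py_alt
  have hguard : ¬ (start_pos < 0 ∨ (article.toList.length : Int) < end_pos ∨ end_pos ≤ start_pos) := by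
    rintro (h | h | h) <;> omega
  rw [if_neg hguard, if_neg hguard]
  have hsp : (start_pos.toNat : Int) = start_pos := Int.toNat_of_nonneg h0
  have hep : (end_pos.toNat : Int) = end_pos := Int.toNat_of_nonneg (by omega)
  have hlen : end_pos.toNat ≤ article.toList.length := by omega
  have hstart : start_pos.toNat < article.toList.length := by omega
  refine Prod.ext ?_ ?_
  · simp only
    rw [startLoop_eq_bStart article.toList start_pos.toNat hstart]
  · simp only
    have hb : bEnd article end_pos = endSpec article.toList end_pos.toNat := by
      rw [← hep]
      exact bEnd_eq_endSpec article end_pos.toNat hlen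
    rw [aEndLoop_eq_endSpec article.toList end_pos.toNat hlen, hb]
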